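-- pv_equiv track=rewrite | github.com/loocasch/uwm-ssi | c01.py | getStandardDeviationForClassDecisions
-- ===== SOURCE A (Python) =====
-- def getStandardDeviationForClassDecisions(lists, classDecisions):
--     tmpDictionary = {}
--     for classDecision in classDecisions:
--         tmpList = []
--         for li in lists:
--             if(classDecision == li[-1]):
--                 tmpList.extend(li)
--         tmpDictionary['klasa decyzyjna {}'.format(
--             classDecision)] = tmpList
--     return tmpDictionary
-- ===== SOURCE B (Python) =====
-- def getStandardDeviationForClassDecisions(lists, classDecisions):
--     buckets = {}
--     for li in lists:
--         buckets.setdefault(li[-1], []).extend(li)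
--     return {'klasa decyzyjna {}'.format(c): buckets.get(c, [])
--             for c in classDecisions}
-- ===== Notes on version B (the rewrite author's own statement) =====
-- stated objective: faster
-- what changed: Instead of rescanning all lists for every class decision (O(C*L)), B buckets all lists by their last element in one pass into a dict and then maps each class decision to its bucket (O(L+C)); Pre_ excludes inputs with an empty inner list, where A raises IndexError unless classDecisions is empty while B always raises.
-- outside the precondition, e.g. on getStandardDeviationForClassDecisions([[2], [], [5, 2, 8818], [2, 10]], []): A returns {}, B raises IndexError
import Mathlib
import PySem

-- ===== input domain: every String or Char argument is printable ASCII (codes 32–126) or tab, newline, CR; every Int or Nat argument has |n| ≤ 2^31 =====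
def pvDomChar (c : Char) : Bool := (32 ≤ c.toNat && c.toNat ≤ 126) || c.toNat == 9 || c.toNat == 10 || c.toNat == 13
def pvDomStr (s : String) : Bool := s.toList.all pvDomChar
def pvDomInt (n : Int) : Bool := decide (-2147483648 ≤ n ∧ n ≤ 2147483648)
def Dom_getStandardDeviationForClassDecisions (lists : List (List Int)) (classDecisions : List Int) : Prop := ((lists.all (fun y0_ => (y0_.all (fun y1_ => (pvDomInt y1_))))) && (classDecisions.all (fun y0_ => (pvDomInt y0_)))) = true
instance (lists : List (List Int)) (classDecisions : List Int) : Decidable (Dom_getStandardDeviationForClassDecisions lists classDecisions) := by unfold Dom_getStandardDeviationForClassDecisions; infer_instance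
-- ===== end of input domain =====

-- B replaces A's per-class rescan of all lists with a single bucketing pass keyed by each list's last element (objective: faster).
-- ===== PORT A =====
-- for classDecision in classDecisions: tmpList = concat of lists whose last element equals it; dict keyed by the formatted string
def getStandardDeviationForClassDecisions (lists : List (List Int)) (classDecisions : List Int) : List (String × List Int) :=
  (classDecisions.foldl
    (fun (d : PySem.Dict String (List Int)) c =>
      let tmpList := lists.foldl
        (fun acc li => if some c == PySem.List.pyGet? li (-1) then acc ++ li else acc) []
      d.insert ("klasa decyzyjna " ++ PySem.Int.toStr c) tmpList)
    PySem.Dict.empty).items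

-- ===== PORT B =====
-- buckets.setdefault(li[-1], []).extend(li); then each class decision maps to buckets.get(c, []).
-- (li[-1] is ported as pyGetD li (-1) 0: on the empty list Source B raises, which Pre_ excludes.)
def getStandardDeviationForClassDecisions_alt (lists : List (List Int)) (classDecisions : List Int) : List (String × List Int) :=
  let buckets := lists.foldl
    (fun (d : PySem.Dict Int (List Int)) li =>
      d.modify (PySem.List.pyGetD li (-1) 0) [] (fun v => v ++ li)) PySem.Dict.empty
  (classDecisions.foldl
    (fun (d : PySem.Dict String (List Int)) c =>
      d.insert ("klasa decyzyjna " ++ PySem.Int.toStr c) (buckets.getD c []))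
    PySem.Dict.empty).items

-- ===== PRECONDITION & SPEC =====
-- Pre_ excludes inputs containing an empty inner list: B always raises IndexError on li[-1] there, and A raises too except when classDecisions is empty (then A never reads li[-1] and returns {}).
def Pre_getStandardDeviationForClassDecisions (lists : List (List Int)) (classDecisions : List Int) : Prop :=
  ∀ li ∈ lists, li ≠ []
instance (lists : List (List Int)) (classDecisions : List Int) : Decidable (Pre_getStandardDeviationForClassDecisions lists classDecisions) := by
  unfold Pre_getStandardDeviationForClassDecisions; infer_instance
def pvWitness_getStandardDeviationForClassDecisions : List (List Int) × List Int := ([[1, 2], [3, 2], [4, 5]], [2, 5, 7])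
def Spec_getStandardDeviationForClassDecisions (lists : List (List Int)) (classDecisions : List Int) (out : List (String × List Int)) : Prop := out = getStandardDeviationForClassDecisions_alt lists classDecisions
instance (lists : List (List Int)) (classDecisions : List Int) (out : List (String × List Int)) : Decidable (Spec_getStandardDeviationForClassDecisions lists classDecisions out) := by unfold Spec_getStandardDeviationForClassDecisions; infer_instance

-- ===== CLAIM (what is proved, stated in full; the proofs are below) =====
def Claim_equal_getStandardDeviationForClassDecisions : Prop := ∀ (lists : List (List Int)) (classDecisions : List Int), Dom_getStandardDeviationForClassDecisions lists classDecisions → Pre_getStandardDeviationForClassDecisions lists classDecisions → Spec_getStandardDeviationForClassDecisions lists classDecisions (getStandardDeviationForClassDecisions lists classDecisions)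

-- ===== LEMMAS AND PROOFS =====
-- The bucket dict's entry at c is exactly A's inner loop: concatenation of the lists ending in c.
lemma pv_bucket_getD (c : Int) :
    ∀ (L : List (List Int)) (d : PySem.Dict Int (List Int)), (∀ li ∈ L, li ≠ []) →
      (L.foldl (fun d li => d.modify (PySem.List.pyGetD li (-1) 0) [] (fun v => v ++ li)) d).getD c []
        = L.foldl (fun acc li => if some c == PySem.List.pyGet? li (-1) then acc ++ li else acc) (d.getD c [])
  | [], d, _ => rfl
  | li :: L, d, h => by
    have hne : li ≠ [] := h li (by simp)
    have hkey : PySem.List.pyGetD li (-1) 0 = li.getLast hne := PySem.List.pyGetD_neg_one li 0 hne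
    have hget : PySem.List.pyGet? li (-1) = some (li.getLast hne) := by
      rw [PySem.List.pyGet?_neg_one, List.getLast?_eq_some_getLast]
    simp only [List.foldl_cons]
    rw [pv_bucket_getD c L _ (fun x hx => h x (by simp [hx]))]
    congr 1
    by_cases hc : c = li.getLast hne
    · subst hc
      rw [hkey, PySem.Dict.getD_modify_self]
      simp [hget]
    · rw [hkey, PySem.Dict.getD_modify_of_ne]
      · simp [hget, hc]
      · exact fun heq => hc heq

-- ===== VERDICT (by name: the statement is the Claim_ definition above) =====
theorem getStandardDeviationForClassDecisions_spec : Claim_equal_getStandardDeviationForClassDecisions := by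
  intro lists classDecisions _ hpre
  unfold Spec_getStandardDeviationForClassDecisions
  unfold getStandardDeviationForClassDecisions getStandardDeviationForClassDecisions_alt
  congr 1
  apply PySem.List.foldl_congr_mem
  intro d c _
  rw [pv_bucket_getD c lists PySem.Dict.empty hpre]
  rfl
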